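-- pv_equiv track=rewrite | github.com/sid203/Data_Mining_and_Machine_Learning | Networking/Part2.py | delete_edges
-- ===== SOURCE A (Python) =====
-- def delete_edges(number,graph):
--     temp = {}
--     for item in graph.items():
--         key = item[0]
--         temp[str(key)] =(item[1])
--     count = 0
--     for item in temp.items():
--         for specific_edge in item[1]:
--             count+=1
--             if count==number:
--                 del temp[str(item[0])][str(specific_edge)]
--                 break
--     return temp
-- ===== SOURCE B (Python) =====
-- def delete_edges(number, graph):
--     # Shallow str-keyed copy: inner dicts stay shared, so deletion mutates them too.
--     temp = {str(k): v for k, v in graph.items()}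
--     n = number
--     if n >= 1:
--         for key, edges in temp.items():
--             if n <= len(edges):
--                 victim = list(edges)[n - 1]
--                 del edges[str(victim)]
--                 break
--             n -= len(edges)
--     return temp
-- ===== Notes on version B (the rewrite author's own statement) =====
-- stated objective: alternative
-- what changed: A numbers every edge with a running counter inside a nested loop and deletes when the counter hits `number`; B skips whole adjacency blocks arithmetically (subtracting each block's length from the remaining index) and indexes once into the matched block to pick the victim edge.
import Mathlib
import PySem

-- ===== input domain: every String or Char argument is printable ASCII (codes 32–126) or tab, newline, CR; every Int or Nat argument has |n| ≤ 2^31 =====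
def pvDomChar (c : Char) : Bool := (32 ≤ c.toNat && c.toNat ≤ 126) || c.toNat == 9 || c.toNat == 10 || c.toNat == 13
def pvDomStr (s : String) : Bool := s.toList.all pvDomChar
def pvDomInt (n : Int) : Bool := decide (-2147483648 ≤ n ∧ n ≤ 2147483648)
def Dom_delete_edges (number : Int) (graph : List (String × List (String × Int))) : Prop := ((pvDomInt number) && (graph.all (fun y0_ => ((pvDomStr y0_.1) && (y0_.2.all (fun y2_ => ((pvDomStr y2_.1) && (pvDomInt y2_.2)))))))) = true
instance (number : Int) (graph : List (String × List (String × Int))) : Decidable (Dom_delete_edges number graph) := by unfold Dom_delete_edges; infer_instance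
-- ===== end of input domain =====

-- B replaces A's edge-by-edge counter with arithmetic skipping over whole inner dicts (subtract
-- block lengths, index once into the matched block): a different decomposition of the same task.
-- Both Pythons mutate the (shared) inner dict of the chosen key; the equivalence proved here is
-- about the RETURN value only.

-- Marshalling of the call boundary (both Pythons receive a dict of dicts): duplicate keys
-- collapse with Python's dict rule (last value wins, first position kept).
def pvToDict (graph : List (String × List (String × Int))) : PySem.Dict String (PySem.Dict String Int) :=
  PySem.Dict.ofList (graph.map (fun p => (p.1, PySem.Dict.ofList p.2)))

-- ===== PORT A =====
-- inner 'for specific_edge in item[1]': count += 1; on count == number, del + break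
def pvAIn (number : Int) (key : String) (edges : List String) (count : Int)
    (temp : PySem.Dict String (PySem.Dict String Int)) :
    Int × PySem.Dict String (PySem.Dict String Int) :=
  match edges with
  | [] => (count, temp)
  | e :: rest =>
    let count := count + 1
    if count = number then
      -- del temp[str(item[0])][str(specific_edge)]; break  (str on a str is identity)
      (count, temp.insert key ((temp.getD key PySem.Dict.empty).erase e))
    else pvAIn number key rest count temp

-- outer 'for item in temp.items()'
def pvAOut (number : Int) (items : List (String × PySem.Dict String Int)) (count : Int)
    (temp : PySem.Dict String (PySem.Dict String Int)) :
    PySem.Dict String (PySem.Dict String Int) :=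
  match items with
  | [] => temp
  | (k, v) :: rest =>
    let r := pvAIn number k v.keys count temp
    pvAOut number rest r.1 r.2

def delete_edges (number : Int) (graph : List (String × List (String × Int))) :
    List (String × List (String × Int)) :=
  let g := pvToDict graph
  -- temp = {}; for item in graph.items(): temp[str(item[0])] = item[1]
  let temp := g.items.foldl (fun t it => t.insert it.1 it.2) PySem.Dict.empty
  ((pvAOut number temp.items 0 temp).items.map (fun p => (p.1, p.2.items)))

-- ===== PORT B =====
-- 'for key, edges in temp.items(): if n <= len(edges): del edges[list(edges)[n-1]]; break else n -= len(edges)'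
def pvBFind (n : Int) (items : List (String × PySem.Dict String Int))
    (temp : PySem.Dict String (PySem.Dict String Int)) :
    PySem.Dict String (PySem.Dict String Int) :=
  match items with
  | [] => temp
  | (k, v) :: rest =>
    if n ≤ (v.size : Int) then
      match PySem.List.pyGet? v.keys (n - 1) with
      | some victim => temp.insert k (v.erase victim)   -- del edges[victim] (edges is temp[k])
      | none => temp   -- unreachable (1 ≤ n ≤ len(edges)); Python would raise IndexError
    else pvBFind (n - v.size) rest temp

def delete_edges_alt (number : Int) (graph : List (String × List (String × Int))) :
    List (String × List (String × Int)) :=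
  let g := pvToDict graph
  -- temp = {str(k): v for k, v in graph.items()}
  let temp := PySem.Dict.ofList g.items
  let res := if 1 ≤ number then pvBFind number temp.items temp else temp
  res.items.map (fun p => (p.1, p.2.items))

-- ===== PRECONDITION & SPEC =====
def Spec_delete_edges (number : Int) (graph : List (String × List (String × Int))) (out : List (String × List (String × Int))) : Prop := out = delete_edges_alt number graph
instance (number : Int) (graph : List (String × List (String × Int))) (out : List (String × List (String × Int))) : Decidable (Spec_delete_edges number graph out) := by unfold Spec_delete_edges; infer_instance

-- ===== CLAIM (what is proved, stated in full; the proofs are below) =====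
def Claim_equal_delete_edges : Prop := ∀ (number : Int) (graph : List (String × List (String × Int))), Dom_delete_edges number graph → Spec_delete_edges number graph (delete_edges number graph)

-- ===== LEMMAS AND PROOFS =====

-- Python's xs[i] on a cons, for a positive index
theorem pvPyGet_cons_pos {a : Type} (x : a) (xs : List a) (i : Int) (h : 1 <= i) :
    PySem.List.pyGet? (x :: xs) i = PySem.List.pyGet? xs (i - 1) := by
  simp only [PySem.List.pyGet?, PySem.List.pyIdx?, List.length_cons]
  rw [if_pos (by omega : (0:Int) <= i), if_pos (by omega : (0:Int) <= i - 1)]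
  by_cases hlt : i - 1 < (xs.length : Int)
  · rw [if_pos (by push_cast; omega), if_pos hlt]
    have hi : i.toNat = (i - 1).toNat + 1 := by omega
    rw [hi]
    simp
  · rw [if_neg (by push_cast; omega), if_neg hlt]
    simp

-- A's inner loop when the counter never reaches `number` inside this block
theorem pvAIn_miss (number : Int) (key : String)
    (temp : PySem.Dict String (PySem.Dict String Int)) :
    ∀ (edges : List String) (count : Int),
      (number <= count ∨ count + edges.length < number) →
      pvAIn number key edges count temp = (count + edges.length, temp) := by
  intro edges
  induction edges with
  | nil => intro count _; simp [pvAIn]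
  | cons e rest ih =>
    intro count h
    simp only [List.length_cons] at h ⊢
    have hne : ¬ (count + 1 = number) := by
      rcases h with h | h
      · omega
      · push_cast at h; omega
    have h' : number <= count + 1 ∨ count + 1 + (rest.length : Int) < number := by
      rcases h with h | h
      · left; omega
      · right; push_cast at h; omega
    simp only [pvAIn, if_neg hne]
    rw [ih (count + 1) h']
    congr 1
    push_cast
    ring

-- A's inner loop when the counter reaches `number` inside this block
theorem pvAIn_hit (number : Int) (key : String)
    (temp : PySem.Dict String (PySem.Dict String Int)) :
    ∀ (edges : List String) (count : Int),
      count < number → number <= count + edges.length →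
      pvAIn number key edges count temp =
        (number,
          match PySem.List.pyGet? edges (number - count - 1) with
          | some e => temp.insert key ((temp.getD key PySem.Dict.empty).erase e)
          | none => temp) := by
  intro edges
  induction edges with
  | nil => intro count h1 h2; simp only [List.length_nil] at h2; omega
  | cons e rest ih =>
    intro count h1 h2
    simp only [List.length_cons] at h2
    by_cases heq : count + 1 = number
    · have hidx : number - count - 1 = 0 := by omega
      simp [pvAIn, heq, hidx, PySem.List.pyGet?, PySem.List.pyIdx?]
    · have h2' : number <= count + 1 + (rest.length : Int) := by push_cast at h2; omega
      simp only [pvAIn, if_neg heq]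
      rw [ih (count + 1) (by omega) h2']
      rw [pvPyGet_cons_pos _ _ _ (by omega)]
      have harith : number - count - 1 - 1 = number - (count + 1) - 1 := by ring
      rw [harith]

-- once the counter has passed `number`, A never mutates again
theorem pvAOut_ge (number : Int) :
    ∀ (items : List (String × PySem.Dict String Int)) (count : Int)
      (temp : PySem.Dict String (PySem.Dict String Int)),
      number <= count → pvAOut number items count temp = temp := by
  intro items
  induction items with
  | nil => intro count temp _; simp [pvAOut]
  | cons p rest ih =>
    intro count temp h
    obtain ⟨k, v⟩ := p
    simp only [pvAOut]
    rw [pvAIn_miss number k temp v.keys count (Or.inl h)]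
    exact ih _ _ (by omega)

-- main correspondence: A's counting loop equals B's length-skipping scan
theorem pvMain (number : Int) :
    ∀ (items : List (String × PySem.Dict String Int)) (count : Int)
      (temp : PySem.Dict String (PySem.Dict String Int)),
      (∀ p ∈ items, temp.getD p.1 PySem.Dict.empty = p.2) →
      count < number →
      pvAOut number items count temp = pvBFind (number - count) items temp := by
  intro items
  induction items with
  | nil => intro count temp _ _; simp [pvAOut, pvBFind]
  | cons p rest ih =>
    intro count temp H hc
    obtain ⟨k, v⟩ := p
    have hv : temp.getD k PySem.Dict.empty = v := H (k, v) List.mem_cons_self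
    have hlen : (v.size : Int) = (v.keys.length : Int) := by
      simp [PySem.Dict.size, PySem.Dict.keys]
    simp only [pvAOut, pvBFind]
    by_cases hle : number <= count + (v.keys.length : Int)
    · rw [pvAIn_hit number k temp v.keys count hc hle]
      rw [if_pos (by omega : number - count <= (v.size : Int))]
      cases hget : PySem.List.pyGet? v.keys (number - count - 1) with
      | none => simp only []; exact pvAOut_ge number rest number _ le_rfl
      | some e =>
        simp only [hv]
        exact pvAOut_ge number rest number _ le_rfl
    · rw [pvAIn_miss number k temp v.keys count (Or.inr (by omega))]
      rw [if_neg (by omega : ¬ (number - count <= (v.size : Int)))]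
      have H' : ∀ p ∈ rest, temp.getD p.1 PySem.Dict.empty = p.2 :=
        fun p hp => H p (List.mem_cons_of_mem _ hp)
      rw [ih (count + (v.keys.length : Int)) temp H' (by omega)]
      congr 1
      omega

-- rebuilding a dict from its items (fresh distinct keys into an empty dict) gives it back
theorem pvRebuild (g : PySem.Dict String (PySem.Dict String Int)) (hnd : g.keys.Nodup) :
    g.items.foldl (fun t it => t.insert it.1 it.2) PySem.Dict.empty = g := by
  apply PySem.Dict.ext
  rw [PySem.Dict.items_foldl_insert_fresh g.items Prod.fst Prod.snd PySem.Dict.empty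
        (fun a _ => PySem.Dict.contains_empty _)
        (by simpa [PySem.Dict.keys] using hnd)]
  simp [PySem.Dict.empty]

-- ===== VERDICT (by name: the statement is the Claim_ definition above) =====
theorem delete_edges_spec : Claim_equal_delete_edges := by
  intro number graph _
  unfold Spec_delete_edges delete_edges delete_edges_alt
  have hnd : (pvToDict graph).keys.Nodup := PySem.Dict.nodup_keys_ofList _
  have hre : (pvToDict graph).items.foldl (fun t it => t.insert it.1 it.2) PySem.Dict.empty
      = pvToDict graph := pvRebuild _ hnd
  have hofl : PySem.Dict.ofList (pvToDict graph).items = pvToDict graph := hre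
  simp only [hre, hofl]
  by_cases h1 : 1 <= number
  · rw [if_pos h1]
    rw [pvMain number (pvToDict graph).items 0 (pvToDict graph)
          (fun p hp => by
            obtain ⟨pk, pv⟩ := p
            exact PySem.Dict.getD_of_mem_items _ hp hnd _)
          (by omega)]
    norm_num
  · rw [if_neg h1]
    rw [pvAOut_ge number _ 0 _ (by omega)]
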